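-- pv_equiv track=rewrite | github.com/adrianbasco/DataHack_Hugo_Emma_Zev_Adrian | back_end/precache/output.py | _sorted_fsq_place_ids
-- ===== SOURCE A (Python) =====
-- from collections.abc import Mapping, Sequence
-- from typing import TYPE_CHECKING, Any
--
-- class PrecacheOutputError(RuntimeError):
--     """Raised when pre-cache output cannot be written or read safely."""
--
-- def _sorted_fsq_place_ids(fsq_place_ids: Sequence[str]) -> tuple[str, ...]:
--     if isinstance(fsq_place_ids, (str, bytes)) or not isinstance(fsq_place_ids, Sequence):
--         raise PrecacheOutputError("fsq_place_ids must be a non-empty sequence of strings.")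
--     ids = tuple(_required_text(value, "fsq_place_id") for value in fsq_place_ids)
--     if not ids:
--         raise PrecacheOutputError("fsq_place_ids must contain at least one id.")
--     duplicate_ids = sorted(_duplicates(ids))
--     if duplicate_ids:
--         raise PrecacheOutputError(f"fsq_place_ids contains duplicate ids {duplicate_ids}.")
--     return tuple(sorted(ids))
--
-- def _duplicates(values: Sequence[str]) -> set[str]:
--     seen: set[str] = set()
--     duplicates: set[str] = set()
--     for value in values:
--         if value in seen:
--             duplicates.add(value)
--         seen.add(value)
--     return duplicates
--
-- def _required_text(value: Any, field_name: str) -> str: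
--     text = _optional_text(value)
--     if text is None:
--         raise PrecacheOutputError(f"{field_name} must be a non-empty string.")
--     return text
--
-- def _optional_text(value: Any) -> str | None:
--     if value is None:
--         return None
--     try:
--         if bool(value != value):
--             return None
--     except Exception:
--         pass
--     text = str(value).strip()
--     return text or None
-- ===== SOURCE B (Python) =====
-- class PrecacheOutputError(RuntimeError):
--     """Raised when pre-cache output cannot be written or read safely."""
--
--
-- def _sorted_fsq_place_ids(fsq_place_ids):
--     if isinstance(fsq_place_ids, (str, bytes)):
--         raise PrecacheOutputError("fsq_place_ids must be a non-empty sequence of strings.")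
--     ids = []
--     for value in fsq_place_ids:
--         text = str(value).strip() if value is not None else ""
--         if not text:
--             raise PrecacheOutputError("fsq_place_id must be a non-empty string.")
--         ids.append(text)
--     if not ids:
--         raise PrecacheOutputError("fsq_place_ids must contain at least one id.")
--     ordered = sorted(ids)
--     duplicate_ids = []
--     for i in range(1, len(ordered)):
--         if ordered[i] == ordered[i - 1] and (not duplicate_ids or duplicate_ids[-1] != ordered[i]):
--             duplicate_ids.append(ordered[i])
--     if duplicate_ids:
--         raise PrecacheOutputError(f"fsq_place_ids contains duplicate ids {duplicate_ids}.")
--     return tuple(ordered)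
-- ===== Notes on version B (the rewrite author's own statement) =====
-- stated objective: alternative
-- what changed: Replaces the seen-set/duplicate-set pass followed by a separate sort of the duplicates with a sort-first strategy: sort once, then detect duplicates by a single adjacency scan over the sorted list (guarding runs of 3+ so each duplicate is reported once, already in sorted order).
import Mathlib
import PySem

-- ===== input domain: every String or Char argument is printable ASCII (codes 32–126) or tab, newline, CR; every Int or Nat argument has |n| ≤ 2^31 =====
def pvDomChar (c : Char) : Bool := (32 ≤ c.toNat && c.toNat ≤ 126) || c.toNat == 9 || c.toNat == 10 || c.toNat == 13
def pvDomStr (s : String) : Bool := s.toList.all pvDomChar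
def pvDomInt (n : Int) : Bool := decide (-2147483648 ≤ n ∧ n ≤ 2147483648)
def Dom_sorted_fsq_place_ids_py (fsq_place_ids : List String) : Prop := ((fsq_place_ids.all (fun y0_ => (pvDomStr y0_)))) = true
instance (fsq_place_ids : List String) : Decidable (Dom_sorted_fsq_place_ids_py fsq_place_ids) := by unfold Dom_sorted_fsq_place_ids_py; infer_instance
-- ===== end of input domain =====

-- ===== PORT A =====
-- B replaces the seen-set duplicate detection + separate sort of the duplicates by a
-- sort-first adjacency scan; equivalence is about the return value (A raises on empty
-- input, empty-after-strip ids and duplicates — those inputs are outside Pre_).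

-- _duplicates: seen/duplicates set fold
def pvDupsA : List String → PySem.Set String → PySem.Set String → PySem.Set String
  | [], _, dups => dups
  | v :: rest, seen, dups =>
    if PySem.Set.contains seen v
      then pvDupsA rest (PySem.Set.add seen v) (PySem.Set.add dups v)
      else pvDupsA rest (PySem.Set.add seen v) dups

def sorted_fsq_place_ids_py (fsq_place_ids : List String) : List String :=
  let ids := fsq_place_ids.map (fun v => PySem.Str.strip v)   -- _required_text strips each value
  if ids.any (fun t => t == "") then []                       -- _required_text raises: outside Pre_
  else if ids.isEmpty then []                                 -- "at least one id" raise: outside Pre_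
  else
    let duplicate_ids :=
      PySem.List.sorted (pvDupsA ids PySem.Set.empty PySem.Set.empty) (fun x => x) false
    if duplicate_ids.isEmpty = false then []                  -- duplicate raise: outside Pre_
    else PySem.List.sorted ids (fun x => x) false

-- ===== PORT B =====
-- adjacency scan over the sorted list; acc holds the duplicates in reverse (append = cons+reverse)
def pvAdjScan : String → List String → List String → List String
  | _, [], acc => acc.reverse
  | prev, x :: xs, acc =>
    if x == prev && acc.head? != some x
      then pvAdjScan x xs (x :: acc)
      else pvAdjScan x xs acc

def sorted_fsq_place_ids_py_alt (fsq_place_ids : List String) : List String :=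
  let ids := fsq_place_ids.map (fun v => PySem.Str.strip v)
  if ids.any (fun t => t == "") then []                       -- raise: outside Pre_
  else if ids.isEmpty then []                                 -- raise: outside Pre_
  else
    let ordered := PySem.List.sorted ids (fun x => x) false
    let duplicate_ids := match ordered with
      | [] => []
      | x :: xs => pvAdjScan x xs []
    if duplicate_ids.isEmpty = false then []                  -- raise: outside Pre_
    else ordered

-- ===== PRECONDITION & SPEC =====
-- Pre_ excludes exactly the inputs on which A raises PrecacheOutputError: the empty list,
-- any element that is empty after stripping, and lists with duplicate stripped ids.
def Pre_sorted_fsq_place_ids_py (fsq_place_ids : List String) : Prop :=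
  fsq_place_ids ≠ [] ∧ (∀ s ∈ fsq_place_ids, PySem.Str.strip s ≠ "") ∧
    (fsq_place_ids.map (fun v => PySem.Str.strip v)).Nodup
instance (fsq_place_ids : List String) : Decidable (Pre_sorted_fsq_place_ids_py fsq_place_ids) := by
  unfold Pre_sorted_fsq_place_ids_py; infer_instance

def pvWitness_sorted_fsq_place_ids_py : List String := ["b", " a ", "c"]

def Spec_sorted_fsq_place_ids_py (fsq_place_ids : List String) (out : List String) : Prop := out = sorted_fsq_place_ids_py_alt fsq_place_ids
instance (fsq_place_ids : List String) (out : List String) : Decidable (Spec_sorted_fsq_place_ids_py fsq_place_ids out) := by unfold Spec_sorted_fsq_place_ids_py; infer_instance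

-- ===== CLAIM (what is proved, stated in full; the proofs are below) =====
def Claim_equal_sorted_fsq_place_ids_py : Prop := ∀ (fsq_place_ids : List String), Dom_sorted_fsq_place_ids_py fsq_place_ids → Pre_sorted_fsq_place_ids_py fsq_place_ids → Spec_sorted_fsq_place_ids_py fsq_place_ids (sorted_fsq_place_ids_py fsq_place_ids)

-- ===== LEMMAS AND PROOFS =====

-- A's duplicate fold returns its accumulator unchanged when no element has been seen and no element repeats
theorem pvDupsA_of_nodup (ids : List String) (seen dups : PySem.Set String)
    (hseen : ∀ x ∈ ids, x ∉ seen) (hnd : ids.Nodup) :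
    pvDupsA ids seen dups = dups := by
  induction ids generalizing seen with
  | nil => rfl
  | cons v rest ih =>
    have hv : v ∉ seen := hseen v (by simp)
    have hc : PySem.Set.contains seen v = false := by
      simpa [PySem.Set.contains] using hv
    simp only [pvDupsA, hc, Bool.false_eq_true, if_false]
    apply ih
    · intro x hx
      have hxv : x ≠ v := by
        rcases List.nodup_cons.mp hnd with ⟨hniv, _⟩
        intro h; exact hniv (h ▸ hx)
      have := hseen x (List.mem_cons_of_mem _ hx)
      simp [PySem.Set.mem_add, this, hxv]
    · exact (List.nodup_cons.mp hnd).2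

-- B's adjacency scan finds nothing on a list with no repeated element
theorem pvAdjScan_of_nodup (prev : String) (rest : List String) (acc : List String)
    (hnd : (prev :: rest).Nodup) :
    pvAdjScan prev rest acc = acc.reverse := by
  induction rest generalizing prev acc with
  | nil => rfl
  | cons x xs ih =>
    have hxp : x ≠ prev := by
      rcases List.nodup_cons.mp hnd with ⟨hniv, _⟩
      intro h; exact hniv (by simp [h])
    have : (x == prev) = false := by simpa using hxp
    simp only [pvAdjScan, this, Bool.false_and, Bool.false_eq_true, if_false]
    exact ih x acc (List.nodup_cons.mp hnd).2

-- ===== VERDICT (by name: the statement is the Claim_ definition above) =====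
theorem sorted_fsq_place_ids_py_spec : Claim_equal_sorted_fsq_place_ids_py := by
  intro l _ hpre
  obtain ⟨hne, hnz, hnd⟩ := hpre
  unfold Spec_sorted_fsq_place_ids_py sorted_fsq_place_ids_py sorted_fsq_place_ids_py_alt
  have hany : (l.map (fun v => PySem.Str.strip v)).any (fun t => t == "") = false := by
    simp only [List.any_map, List.any_eq_false]
    intro s hs
    simpa using hnz s hs
  have hids : l.map (fun v => PySem.Str.strip v) ≠ [] := by
    simpa using hne
  have h4 : (l.map (fun v => PySem.Str.strip v)).isEmpty = false := by
    simpa [List.isEmpty_iff] using hids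
  -- A side: the duplicate set is empty
  have h3 : pvDupsA (l.map (fun v => PySem.Str.strip v)) PySem.Set.empty PySem.Set.empty = [] := by
    apply pvDupsA_of_nodup _ _ _ _ hnd
    intro x hx
    simp [PySem.Set.empty]
  -- B side: the sorted list has no adjacent equal elements
  have hsnd : (PySem.List.sorted (l.map (fun v => PySem.Str.strip v)) (fun x => x) false).Nodup :=
    (PySem.List.sorted_perm _ _ _).nodup_iff.mpr hnd
  rcases hord : PySem.List.sorted (l.map (fun v => PySem.Str.strip v)) (fun x => x) false with
    _ | ⟨x, xs⟩
  · exact absurd ((PySem.List.sorted_eq_nil_iff _ _ _).mp hord) hids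
  · have h2 : pvAdjScan x xs [] = [] := pvAdjScan_of_nodup x xs [] (hord ▸ hsnd)
    have h5 : PySem.List.sorted ([] : List String) (fun x => x) false = [] := rfl
    simp only [hany, Bool.false_eq_true, Bool.true_eq_false, if_false, h4, hord, h3, h2, h5,
      List.isEmpty_nil]
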